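-- pv_equiv track=rewrite | github.com/Rvs006/edq | server/backend/app/services/device_fingerprinter.py | _compute_port_skips
-- ===== SOURCE A (Python) =====
-- def _compute_port_skips(open_ports: set[int], services: dict[int, str] | None = None) -> dict[str, str]:
--     """Determine which tests to skip based on absent ports/services.
--
--     Returns a dict mapping test_id → human-readable skip reason.
--     """
--     skips: dict[str, str] = {}
--     services = services or {}
--
--     def _has_service_port(*keywords: str, common_ports: set[int] | None = None) -> bool:
--         common_ports = common_ports or set()
--         if open_ports & common_ports:
--             return True
--         lowered = [svc.lower() for svc in services.values()]
--         return any(any(keyword in svc for keyword in keywords) for svc in lowered)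
--
--     # No HTTPS/TLS → skip TLS tests. Check port 443 first, then any HTTPS service.
--     has_https = 443 in open_ports
--     if not has_https and services:
--         https_keywords = {"ssl", "https", "ssl/http", "ssl/https"}
--         has_https = any(
--             svc.lower() in https_keywords or "https" in svc.lower() or "ssl" in svc.lower()
--             for svc in services.values()
--         )
--     if not has_https:
--         reason = "Skipped — no HTTPS/TLS service detected on this device, so TLS tests cannot run."
--         for tid in ("U10", "U11", "U12", "U13"):
--             skips[tid] = reason
--
--     # No SSH service → skip SSH audit
--     if not _has_service_port("ssh", common_ports={22}):
--         skips["U15"] = "Skipped — no SSH service detected on this device."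
--
--     # No RTSP service → skip RTSP auth test
--     if not _has_service_port("rtsp", common_ports={554, 8554}):
--         skips["U37"] = "Skipped — no RTSP service detected on this device. No video stream to test."
--
--     # No HTTP at all → skip HTTP-specific tests
--     has_http = _has_service_port(
--         "http",
--         "www",
--         common_ports={80, 443, 8000, 8008, 8080, 8081, 8443, 8888},
--     )
--     if not has_http:
--         reason = "Skipped — no HTTP/HTTPS service detected."
--         for tid in ("U14", "U16", "U17", "U18", "U35"):
--             skips[tid] = reason
--
--     return skips
-- ===== SOURCE B (Python) =====
-- RULES = [
--     (("U10", "U11", "U12", "U13"),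
--      "Skipped — no HTTPS/TLS service detected on this device, so TLS tests cannot run.",
--      ("https", "ssl"), {443}),
--     (("U15",),
--      "Skipped — no SSH service detected on this device.",
--      ("ssh",), {22}),
--     (("U37",),
--      "Skipped — no RTSP service detected on this device. No video stream to test.",
--      ("rtsp",), {554, 8554}),
--     (("U14", "U16", "U17", "U18", "U35"),
--      "Skipped — no HTTP/HTTPS service detected.",
--      ("http", "www"), {80, 443, 8000, 8008, 8080, 8081, 8443, 8888}),
-- ]
--
--
-- def _compute_port_skips(open_ports: set[int], services: dict[int, str] | None = None) -> dict[str, str]: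
--     lowered = [svc.lower() for svc in (services or {}).values()]
--     skips: dict[str, str] = {}
--     for test_ids, reason, keywords, common_ports in RULES:
--         present = bool(open_ports & common_ports) or any(
--             kw in svc for svc in lowered for kw in keywords
--         )
--         if not present:
--             for tid in test_ids:
--                 skips[tid] = reason
--     return skips
-- ===== Notes on version B (the rewrite author's own statement) =====
-- stated objective: simpler
-- what changed: Replaced the four hand-written branch blocks (including the special-cased HTTPS set-membership/substring check) by a single data-driven rules table of (test_ids, reason, keywords, common_ports) scanned once with one uniform presence test; the service values are lowered once up front, and the redundant HTTPS set-membership test and empty-services guard are dropped (they reduce exactly to the 'https'/'ssl' substring checks).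
import Mathlib
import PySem

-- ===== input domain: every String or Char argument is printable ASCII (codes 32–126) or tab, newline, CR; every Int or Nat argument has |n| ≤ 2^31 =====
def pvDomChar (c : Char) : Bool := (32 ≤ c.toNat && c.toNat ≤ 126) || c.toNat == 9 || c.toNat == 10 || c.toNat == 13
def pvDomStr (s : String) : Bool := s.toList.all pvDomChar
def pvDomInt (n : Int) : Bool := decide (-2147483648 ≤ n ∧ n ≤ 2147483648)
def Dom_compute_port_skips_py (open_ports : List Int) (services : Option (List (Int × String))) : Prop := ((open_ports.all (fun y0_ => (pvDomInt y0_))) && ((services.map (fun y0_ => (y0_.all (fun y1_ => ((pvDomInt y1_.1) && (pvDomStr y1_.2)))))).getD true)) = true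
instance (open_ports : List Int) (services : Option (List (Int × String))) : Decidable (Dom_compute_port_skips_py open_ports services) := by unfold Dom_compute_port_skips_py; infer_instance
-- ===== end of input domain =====

-- B replaces A's four hand-written branch blocks by one data-driven rules table scanned with a
-- single uniform presence test (objective: simpler); return values are proved equal everywhere.

-- ===== PORT A =====
-- inner helper `_has_service_port(*keywords, common_ports=...)` of A
def pvHasServicePort (open_ports : List Int) (vals : List String)
    (keywords : List String) (common_ports : List Int) : Bool :=
  if !(PySem.Set.inter open_ports common_ports).isEmpty then true
  else
    let lowered := vals.map PySem.Str.lower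
    lowered.any (fun svc => keywords.any (fun kw => PySem.Str.isIn kw svc))

def compute_port_skips_py (open_ports : List Int) (services : Option (List (Int × String))) : List (String × String) :=
  let skips : PySem.Dict String String := PySem.Dict.empty
  -- `services = services or {}` (None and the empty dict both become {})
  let svcd : PySem.Dict Int String := PySem.Dict.ofList (services.getD [])
  let has_https := open_ports.contains (443 : Int)
  let has_https :=
    if !has_https && !svcd.items.isEmpty then
      svcd.values.any (fun svc =>
        ["ssl", "https", "ssl/http", "ssl/https"].contains (PySem.Str.lower svc)
        || PySem.Str.isIn "https" (PySem.Str.lower svc)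
        || PySem.Str.isIn "ssl" (PySem.Str.lower svc))
    else has_https
  let skips :=
    if !has_https then
      ["U10", "U11", "U12", "U13"].foldl
        (fun d tid => d.insert tid "Skipped — no HTTPS/TLS service detected on this device, so TLS tests cannot run.") skips
    else skips
  let skips :=
    if !pvHasServicePort open_ports svcd.values ["ssh"] [22] then
      skips.insert "U15" "Skipped — no SSH service detected on this device."
    else skips
  let skips :=
    if !pvHasServicePort open_ports svcd.values ["rtsp"] [554, 8554] then
      skips.insert "U37" "Skipped — no RTSP service detected on this device. No video stream to test."
    else skips
  let has_http := pvHasServicePort open_ports svcd.values ["http", "www"]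
      [80, 443, 8000, 8008, 8080, 8081, 8443, 8888]
  let skips :=
    if !has_http then
      ["U14", "U16", "U17", "U18", "U35"].foldl
        (fun d tid => d.insert tid "Skipped — no HTTP/HTTPS service detected.") skips
    else skips
  skips.items

-- ===== PORT B =====
-- the RULES table of Source B: (test_ids, reason, keywords, common_ports)
def pvRules : List (List String × String × List String × List Int) :=
  [ (["U10", "U11", "U12", "U13"],
     "Skipped — no HTTPS/TLS service detected on this device, so TLS tests cannot run.",
     ["https", "ssl"], [443]),
    (["U15"],
     "Skipped — no SSH service detected on this device.",
     ["ssh"], [22]),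
    (["U37"],
     "Skipped — no RTSP service detected on this device. No video stream to test.",
     ["rtsp"], [554, 8554]),
    (["U14", "U16", "U17", "U18", "U35"],
     "Skipped — no HTTP/HTTPS service detected.",
     ["http", "www"], [80, 443, 8000, 8008, 8080, 8081, 8443, 8888]) ]

def compute_port_skips_py_alt (open_ports : List Int) (services : Option (List (Int × String))) : List (String × String) :=
  let lowered := (PySem.Dict.ofList (services.getD ([] : List (Int × String)))).values.map PySem.Str.lower
  let skips : PySem.Dict String String :=
    pvRules.foldl (fun skips r =>
      let present := !(PySem.Set.inter open_ports r.2.2.2).isEmpty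
        || lowered.any (fun svc => r.2.2.1.any (fun kw => PySem.Str.isIn kw svc))
      if !present then r.1.foldl (fun d tid => d.insert tid r.2.1) skips else skips)
      PySem.Dict.empty
  skips.items

-- ===== PRECONDITION & SPEC =====
def Spec_compute_port_skips_py (open_ports : List Int) (services : Option (List (Int × String))) (out : List (String × String)) : Prop := out = compute_port_skips_py_alt open_ports services
instance (open_ports : List Int) (services : Option (List (Int × String))) (out : List (String × String)) : Decidable (Spec_compute_port_skips_py open_ports services out) := by unfold Spec_compute_port_skips_py; infer_instance

-- ===== CLAIM (what is proved, stated in full; the proofs are below) =====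
def Claim_equal_compute_port_skips_py : Prop := ∀ (open_ports : List Int) (services : Option (List (Int × String))), Dom_compute_port_skips_py open_ports services → Spec_compute_port_skips_py open_ports services (compute_port_skips_py open_ports services)

-- ===== LEMMAS AND PROOFS =====

-- A's extra HTTPS set-membership test is subsumed by the two substring tests.
lemma pv_https_kw (t : String) :
    (["ssl", "https", "ssl/http", "ssl/https"].contains t
      || PySem.Str.isIn "https" t || PySem.Str.isIn "ssl" t)
    = (PySem.Str.isIn "https" t || PySem.Str.isIn "ssl" t) := by
  cases hc : (["ssl", "https", "ssl/http", "ssl/https"] : List String).contains t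
  · simp
  · simp only [List.contains_eq_mem, List.mem_cons,
      List.not_mem_nil, or_false, decide_eq_true_eq] at hc
    simp only [Bool.true_or]
    rcases hc with h | h | h | h <;> subst h <;> decide

lemma pv_inter_singleton (s : List Int) (a : Int) :
    (PySem.Set.inter s [a]).isEmpty = !s.contains a := by
  simp only [PySem.Set.inter, List.contains_eq_mem, PySem.Set.contains_eq_listContains,
    List.mem_cons, List.not_mem_nil, or_false]
  induction s with
  | nil => simp
  | cons b t ih =>
      by_cases h : b = a
      · simp [h]
      · simp [h, ih, Ne.symm h]

-- A's helper as the single disjunction B's table loop tests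
lemma pv_cond (op : List Int) (vals : List String) (kws : List String) (cps : List Int) :
    pvHasServicePort op vals kws cps
    = (!(PySem.Set.inter op cps).isEmpty
        || (vals.map PySem.Str.lower).any (fun svc => kws.any (fun kw => PySem.Str.isIn kw svc))) := by
  unfold pvHasServicePort
  cases h : (PySem.Set.inter op cps).isEmpty <;> simp

-- pointwise: A's HTTPS service scan equals B's keyword scan over the lowered values
lemma pv_any_eq (l : List String) :
    l.any (fun svc =>
      (["ssl", "https", "ssl/http", "ssl/https"] : List String).contains (PySem.Str.lower svc)
      || PySem.Str.isIn "https" (PySem.Str.lower svc)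
      || PySem.Str.isIn "ssl" (PySem.Str.lower svc))
    = (l.map PySem.Str.lower).any
        (fun svc => (["https", "ssl"] : List String).any (fun kw => PySem.Str.isIn kw svc)) := by
  induction l with
  | nil => rfl
  | cons s t ih =>
      simp only [List.any_cons, List.map_cons, List.any_nil, Bool.or_false, pv_https_kw,
        List.any_map]
      rfl

-- A's two-step HTTPS detection equals B's uniform rule test for (["https","ssl"], {443})
lemma pv_https (op : List Int) (d : PySem.Dict Int String) :
    (if !op.contains (443 : Int) && !d.items.isEmpty then
       d.values.any (fun svc =>
         (["ssl", "https", "ssl/http", "ssl/https"] : List String).contains (PySem.Str.lower svc)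
         || PySem.Str.isIn "https" (PySem.Str.lower svc)
         || PySem.Str.isIn "ssl" (PySem.Str.lower svc))
     else op.contains (443 : Int))
    = (!(PySem.Set.inter op ([443] : List Int)).isEmpty
        || (d.values.map PySem.Str.lower).any
            (fun svc => (["https", "ssl"] : List String).any (fun kw => PySem.Str.isIn kw svc))) := by
  rw [pv_inter_singleton]
  cases hc : op.contains (443 : Int)
  · cases d with
    | mk l =>
        cases l with
        | nil => simp
        | cons p t =>
            simp only [List.isEmpty_cons, Bool.not_false, Bool.true_and, if_true]
            exact pv_any_eq _
  · simp

-- ===== VERDICT (by name: the statement is the Claim_ definition above) =====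
theorem compute_port_skips_py_spec : Claim_equal_compute_port_skips_py := by
  intro open_ports services _
  unfold Spec_compute_port_skips_py compute_port_skips_py compute_port_skips_py_alt
  simp only [pvRules, List.foldl_cons, List.foldl_nil, pv_cond, pv_https]
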